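-- pv_equiv track=rewrite | github.com/ChanghyunRyu/Python-CodingTest-note | kakao/pick_dice/pick_dice.py | solution
-- ===== SOURCE A (Python) =====
-- from itertools import combinations
-- from bisect import bisect_left
--
-- def solution(dice):
--     answer = []
--     dp = {}
--     max_win = 0
--     for combination in combinations(list(range(1, len(dice)+1)), len(dice)//2):
--         if combination not in dp:
--             temp = []
--             get_dice_sum(0, 0, combination, dice, temp)
--             temp.sort()
--             dp[combination] = temp
--         a = dp[combination]
--         a_side = set(combination)
--         all_side = set(range(1, len(dice)+1))
--         b_side = tuple(all_side-a_side)
--         if b_side not in dp: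
--             temp = []
--             get_dice_sum(0, 0, b_side, dice, temp)
--             temp.sort()
--             dp[b_side] = temp
--         b = dp[b_side]
--         wins = get_win(a, b)
--         if max_win < wins:
--             max_win = wins
--             answer = list(combination)
--     return answer
--
-- def get_dice_sum(i, score, index, dice, result):
--     if i >= len(index):
--         result.append(score)
--     else:
--         for num in dice[index[i]-1]:
--             get_dice_sum(i+1, score+num, index, dice, result)
--
-- def get_win(a, b):
--     result = 0
--     for num in a:
--         result += bisect_left(b, num)
--     return result
-- ===== SOURCE B (Python) =====
-- from itertools import combinations
--
-- def solution(dice):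
--     n = len(dice)
--     nums = range(1, n + 1)
--
--     def dist(subset):
--         # iterative sum distribution of the chosen dice, then sorted
--         sums = [0]
--         for i in subset:
--             sums = [s + v for s in sums for v in dice[i - 1]]
--         sums.sort()
--         return sums
--
--     def wins(a, b):
--         # two-pointer merge over the two sorted arrays:
--         # for each x in a, j ends at the number of elements of b strictly below x
--         total = j = 0
--         for x in a:
--             while j < len(b) and b[j] < x:
--                 j += 1
--             total += j
--         return total
--
--     best, answer = 0, []
--     for comb in combinations(nums, n // 2):
--         chosen = set(comb)
--         rest = [i for i in nums if i not in chosen]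
--         w = wins(dist(comb), dist(rest))
--         if best < w:
--             best, answer = w, list(comb)
--     return answer
-- ===== Notes on version B (the rewrite author's own statement) =====
-- stated objective: alternative
-- what changed: B drops A's DFS recursion and memo dict, building each subset's sum distribution by an iterative product fold and counting wins with a single two-pointer merge over the two sorted arrays instead of one bisect_left per element.
import Mathlib
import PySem

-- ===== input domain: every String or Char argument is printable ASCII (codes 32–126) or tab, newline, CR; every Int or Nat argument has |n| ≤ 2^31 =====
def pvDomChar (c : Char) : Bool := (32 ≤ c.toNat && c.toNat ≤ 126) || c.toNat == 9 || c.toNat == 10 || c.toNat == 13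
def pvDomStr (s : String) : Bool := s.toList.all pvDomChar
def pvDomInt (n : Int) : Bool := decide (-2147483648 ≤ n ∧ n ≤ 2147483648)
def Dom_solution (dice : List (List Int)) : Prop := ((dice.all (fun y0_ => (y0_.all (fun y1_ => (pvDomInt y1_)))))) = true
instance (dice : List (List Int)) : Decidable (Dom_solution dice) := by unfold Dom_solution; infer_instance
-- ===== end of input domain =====

-- B replaces A's DFS-plus-memo-dict sum enumeration by an iterative product fold and the
-- per-element bisect_left win count by a two-pointer merge over the two sorted arrays
-- (objective: alternative, genuinely different structure at similar cost).

-- ===== PORT A =====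

-- get_dice_sum: the recursion on i over `index` becomes structural recursion on the list;
-- the `for num in dice[index[i]-1]` loop is the mutual helper gdsFor.
-- `dice[index[i]-1]` is always in range here (indices come from range(1, len(dice)+1)),
-- so the [] default of pyGetD is never taken.
mutual
def getDiceSum (index : List Int) (score : Int) (dice : List (List Int)) (result : List Int) :
    List Int :=
  match index with
  | [] => result ++ [score]
  | i :: rest => gdsFor (PySem.List.pyGetD dice (i - 1) []) rest score dice result
  termination_by (index.length, 0, 0)

def gdsFor (faces rest : List Int) (score : Int) (dice : List (List Int)) (result : List Int) :
    List Int :=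
  match faces with
  | [] => result
  | num :: nums => gdsFor nums rest score dice (getDiceSum rest (score + num) dice result)
  termination_by (rest.length, 1, faces.length)
end

-- get_win: result += bisect_left(b, num) for each num in a
def getWin (a b : List Int) : Int :=
  a.foldl (fun result num => result + ((PySem.List.bisectLeft b num : Nat) : Int)) 0

-- the body of A's `for combination in combinations(...)` loop; state = (answer, dp, max_win).
-- b_side = tuple(all_side - a_side): PySem.Set.diff keeps the left (ascending) order; the
-- tuple is only used as a dict key and as an index list whose sum list is sorted afterwards,
-- so the returned value does not depend on that order.
def stepA (dice : List (List Int)) (st : List Int × PySem.Dict (List Int) (List Int) × Int)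
    (comb : List Int) : List Int × PySem.Dict (List Int) (List Int) × Int :=
  let dp := if st.2.1.contains comb then st.2.1
            else st.2.1.insert comb (PySem.List.sorted (getDiceSum comb 0 dice []) (fun x => x))
  let a := dp.getD comb []
  let bSide := PySem.Set.diff
      (PySem.Set.ofList (PySem.List.pyRange 1 ((dice.length : Int) + 1)))
      (PySem.Set.ofList comb)
  let dp2 := if dp.contains bSide then dp
             else dp.insert bSide (PySem.List.sorted (getDiceSum bSide 0 dice []) (fun x => x))
  let b := dp2.getD bSide []
  let wins := getWin a b
  if st.2.2 < wins then (comb, dp2, wins) else (st.1, dp2, st.2.2)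

def solution (dice : List (List Int)) : List Int :=
  ((PySem.List.combinations (PySem.List.pyRange 1 ((dice.length : Int) + 1))
      (dice.length / 2)).foldl (stepA dice) ([], PySem.Dict.empty, 0)).1

-- ===== PORT B =====

-- the `while j < len(b) and b[j] < x: j += 1` inner loop of B's two-pointer win count
def advanceTP (b : List Int) (x : Int) (j : Nat) : Nat :=
  if h : j < b.length then
    if b[j] < x then advanceTP b x (j + 1) else j
  else j
  termination_by b.length - j

-- B's wins(a, b): two-pointer merge; state = (total, j)
def winsTP (a b : List Int) : Int :=
  (a.foldl (fun (st : Int × Nat) x =>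
      let j := advanceTP b x st.2
      (st.1 + (j : Int), j)) (0, 0)).1

-- B's dist(subset): iterative product fold, then sorted
def distAlt (dice : List (List Int)) (subset : List Int) : List Int :=
  PySem.List.sorted
    (subset.foldl (fun sums i =>
        sums.flatMap (fun s => (PySem.List.pyGetD dice (i - 1) []).map (fun v => s + v))) [0])
    (fun x => x)

-- the body of B's `for comb in combinations(...)` loop; state = (best, answer)
def stepB (dice : List (List Int)) (st : Int × List Int) (comb : List Int) : Int × List Int :=
  let rest := (PySem.List.pyRange 1 ((dice.length : Int) + 1)).filter
      (fun i => !(PySem.Set.contains (PySem.Set.ofList comb) i))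
  let w := winsTP (distAlt dice comb) (distAlt dice rest)
  if st.1 < w then (w, comb) else st

def solution_alt (dice : List (List Int)) : List Int :=
  ((PySem.List.combinations (PySem.List.pyRange 1 ((dice.length : Int) + 1))
      (dice.length / 2)).foldl (stepB dice) (0, [])).2

-- ===== PRECONDITION & SPEC =====
def Spec_solution (dice : List (List Int)) (out : List Int) : Prop := out = solution_alt dice
instance (dice : List (List Int)) (out : List Int) : Decidable (Spec_solution dice out) := by unfold Spec_solution; infer_instance

-- ===== CLAIM (what is proved, stated in full; the proofs are below) =====
def Claim_equal_solution : Prop := ∀ (dice : List (List Int)), Dom_solution dice → Spec_solution dice (solution dice)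

-- ===== LEMMAS AND PROOFS =====

-- the common sum distribution both dist builders enumerate (in the same order)
def prodSums (dice : List (List Int)) : List Int → List Int
  | [] => [0]
  | i :: rest =>
      (PySem.List.pyGetD dice (i - 1) []).flatMap (fun v => (prodSums dice rest).map (fun s => v + s))

theorem gds_eq (dice : List (List Int)) :
    ∀ (index : List Int) (score : Int) (result : List Int),
      getDiceSum index score dice result = result ++ (prodSums dice index).map (fun s => score + s) := by
  intro index
  induction index with
  | nil => intro score result; simp [getDiceSum, prodSums]
  | cons i rest ih =>
    have hfor : ∀ (faces : List Int) (score : Int) (result : List Int),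
        gdsFor faces rest score dice result =
          result ++ faces.flatMap (fun v => (prodSums dice rest).map (fun s => score + (v + s))) := by
      intro faces
      induction faces with
      | nil => intro score result; simp [gdsFor]
      | cons num nums ihf =>
        intro score result
        rw [gdsFor, ihf, ih]
        simp [add_assoc]
    intro score result
    rw [getDiceSum, hfor]
    simp [prodSums, List.map_flatMap, List.map_map, add_assoc]

theorem foldB_eq (dice : List (List Int)) :
    ∀ (subset : List Int) (acc : List Int),
      subset.foldl (fun sums i =>
          sums.flatMap (fun s => (PySem.List.pyGetD dice (i - 1) []).map (fun v => s + v))) acc =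
        acc.flatMap (fun s => (prodSums dice subset).map (fun t => s + t)) := by
  intro subset
  induction subset with
  | nil => intro acc; simp [prodSums]
  | cons i rest ih =>
    intro acc
    rw [List.foldl_cons, ih]
    simp [prodSums, List.flatMap_assoc, List.flatMap_map, List.map_flatMap, List.map_map, add_assoc]

def DistOf (dice : List (List Int)) (idx : List Int) : List Int :=
  PySem.List.sorted (getDiceSum idx 0 dice []) (fun x => x)

theorem dist_eq (dice : List (List Int)) (idx : List Int) :
    DistOf dice idx = distAlt dice idx := by
  unfold DistOf distAlt
  rw [gds_eq, foldB_eq]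
  simp

-- ---- win-count equivalence ----

def cLt (b : List Int) (x : Int) : Nat := b.countP (fun y => decide (y < x))

theorem cLt_le_length (b : List Int) (x : Int) : cLt b x ≤ b.length :=
  List.countP_le_length

theorem cLt_lt_iff (b : List Int) (x : Int)
    (hb : b.Pairwise (· ≤ ·)) {j : Nat} (hj : j < b.length) :
    j < cLt b x ↔ b[j] < x := by
  have hpw := List.pairwise_iff_getElem.mp hb
  constructor
  · intro hlt
    by_contra hge
    rw [Int.not_lt] at hge
    have hdrop : (b.drop j).countP (fun y => decide (y < x)) = 0 := by
      apply List.countP_eq_zero.mpr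
      intro y hy
      obtain ⟨k, hk, hyk⟩ := List.mem_iff_getElem.mp hy
      rw [List.getElem_drop] at hyk
      have hkb : j + k < b.length := by
        have := List.length_drop (l := b) (i := j); omega
      have : b[j] ≤ y := by
        rcases Nat.eq_zero_or_pos k with hk0 | hkpos
        · subst hk0; simpa using le_of_eq hyk
        · have := hpw j (j + k) hj hkb (by omega)
          rw [hyk] at this; exact this
      simp only [decide_eq_true_eq]
      omega
    have : cLt b x ≤ j := by
      have hsplit : cLt b x =
          (b.take j).countP (fun y => decide (y < x)) + (b.drop j).countP (fun y => decide (y < x)) := by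
        unfold cLt
        rw [← List.countP_append, List.take_append_drop]
      rw [hsplit, hdrop]
      have := List.countP_le_length (l := b.take j) (p := fun y => decide (y < x))
      simp at this
      omega
    omega
  · intro hbj
    have htake : (b.take (j + 1)).countP (fun y => decide (y < x)) = j + 1 := by
      rw [List.countP_eq_length.mpr, List.length_take]
      · omega
      · intro y hy
        obtain ⟨k, hk, hyk⟩ := List.mem_iff_getElem.mp hy
        rw [List.getElem_take] at hyk
        have hklen : k < b.length := by simp [List.length_take] at hk; omega
        have hkj : k ≤ j := by simp [List.length_take] at hk; omega
        have hle : y ≤ b[j] := by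
          rcases Nat.lt_or_ge k j with hkj' | hkj'
          · have := hpw k j hklen hj hkj'
            exact hyk ▸ this
          · have : k = j := by omega
            subst this; rw [hyk]
        simp only [decide_eq_true_eq]
        omega
    have hsplit : cLt b x =
        (b.take (j + 1)).countP (fun y => decide (y < x)) + (b.drop (j + 1)).countP (fun y => decide (y < x)) := by
      unfold cLt
      rw [← List.countP_append, List.take_append_drop]
    omega

theorem bisectLeft_eq_cLt (b : List Int) (x : Int) (hb : b.Pairwise (· ≤ ·)) :
    PySem.List.bisectLeft b x = cLt b x := by
  obtain ⟨hle, hlo, hhi⟩ := PySem.List.bisectLeft_spec b x hb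
  have hc := cLt_le_length b x
  by_contra hne
  rcases Nat.lt_or_ge (PySem.List.bisectLeft b x) (cLt b x) with h | h
  · -- j := bisectLeft: j < cLt → b[j] < x, but spec says x ≤ b[j]
    have hj : PySem.List.bisectLeft b x < b.length := by omega
    have h1 := (cLt_lt_iff b x hb hj).mp h
    have h2 := hhi _ hj (le_refl _)
    omega
  · have h' : cLt b x < PySem.List.bisectLeft b x := by omega
    have hj : cLt b x < b.length := by omega
    have h1 := hlo _ hj h'
    have h2 := (cLt_lt_iff b x hb hj).mpr h1
    omega

theorem advanceTP_eq (b : List Int) (x : Int) (hb : b.Pairwise (· ≤ ·)) :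
    ∀ (k j : Nat), k = cLt b x - j → j ≤ cLt b x → advanceTP b x j = cLt b x := by
  intro k
  induction k with
  | zero =>
    intro j hk hj
    have hj' : j = cLt b x := by omega
    subst hj'
    rw [advanceTP]
    split
    · next h =>
      have hnot : ¬ b[cLt b x] < x := by
        intro hlt
        exact absurd ((cLt_lt_iff b x hb h).mpr hlt) (lt_irrefl _)
      rw [if_neg hnot]
    · rfl
  | succ k ihk =>
    intro j hk hj
    have hjlt : j < cLt b x := by omega
    have hjlen : j < b.length := by
      have := cLt_le_length b x; omega
    rw [advanceTP]
    rw [dif_pos hjlen, if_pos ((cLt_lt_iff b x hb hjlen).mp hjlt)]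
    exact ihk (j + 1) (by omega) (by omega)

theorem cLt_mono (b : List Int) {x y : Int} (h : x ≤ y) : cLt b x ≤ cLt b y := by
  apply List.countP_mono_left
  intro z _ hz
  simp only [decide_eq_true_eq] at *
  omega

theorem winsTP_go (b : List Int) (hb : b.Pairwise (· ≤ ·)) :
    ∀ (a : List Int) (t : Int) (j : Nat), a.Pairwise (· ≤ ·) → (∀ x ∈ a, j ≤ cLt b x) →
      (a.foldl (fun (st : Int × Nat) x =>
          let j := advanceTP b x st.2
          (st.1 + (j : Int), j)) (t, j)).1 =
        t + (a.map (fun x => ((cLt b x : Nat) : Int))).sum := by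
  intro a
  induction a with
  | nil => intro t j _ _; simp
  | cons x rest ih =>
    intro t j ha hj
    have hx : j ≤ cLt b x := hj x (by simp)
    have hadv : advanceTP b x j = cLt b x := advanceTP_eq b x hb _ j rfl hx
    have ha' : rest.Pairwise (· ≤ ·) := ha.of_cons
    have hj' : ∀ y ∈ rest, cLt b x ≤ cLt b y := by
      intro y hy
      exact cLt_mono b (List.rel_of_pairwise_cons ha hy)
    simp only [List.foldl_cons, hadv]
    rw [ih (t + (cLt b x : Int)) (cLt b x) ha' hj']
    simp [add_assoc]

theorem getWin_eq_winsTP (a b : List Int)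
    (ha : a.Pairwise (· ≤ ·)) (hb : b.Pairwise (· ≤ ·)) :
    getWin a b = winsTP a b := by
  unfold getWin winsTP
  rw [PySem.List.foldl_add]
  rw [winsTP_go b hb a 0 0 ha (fun x _ => Nat.zero_le _)]
  have hmap : a.map (fun num => ((PySem.List.bisectLeft b num : Nat) : Int)) =
      a.map (fun x => ((cLt b x : Nat) : Int)) :=
    List.map_congr_left (fun x _ => by rw [bisectLeft_eq_cLt b x hb])
  rw [hmap]

-- ---- sortedness of the distributions ----

theorem DistOf_pairwise (dice : List (List Int)) (idx : List Int) :
    (DistOf dice idx).Pairwise (· ≤ ·) :=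
  PySem.List.sorted_pairwise _ _

-- ---- the complement sides agree ----

theorem pyRange_nodup (a b : Int) : (PySem.List.pyRange a b).Nodup := by
  rw [PySem.List.pyRange_one]
  exact (List.nodup_range).map (fun p q h => by omega)

theorem bSide_eq_rest (comb : List Int) (m : Int) :
    PySem.Set.diff (PySem.Set.ofList (PySem.List.pyRange 1 m)) (PySem.Set.ofList comb) =
      (PySem.List.pyRange 1 m).filter (fun i => !(PySem.Set.contains (PySem.Set.ofList comb) i)) := by
  rw [PySem.Set.ofList_eq_self_of_nodup _ (pyRange_nodup 1 m)]
  rfl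

-- ---- dict cache invariant ----

def InvDp (dice : List (List Int)) (dp : PySem.Dict (List Int) (List Int)) : Prop :=
  ∀ k v, dp.get? k = some v → v = DistOf dice k

theorem cache_step (dice : List (List Int)) (dp : PySem.Dict (List Int) (List Int))
    (k : List Int) (h : InvDp dice dp) :
    (if dp.contains k then dp
     else dp.insert k (PySem.List.sorted (getDiceSum k 0 dice []) (fun x => x))).getD k [] =
        DistOf dice k ∧
      InvDp dice (if dp.contains k then dp
        else dp.insert k (PySem.List.sorted (getDiceSum k 0 dice []) (fun x => x))) := by
  by_cases hc : dp.contains k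
  · rw [if_pos hc]
    refine ⟨?_, h⟩
    have hs : (dp.get? k).isSome := by rw [← PySem.Dict.contains_eq_isSome_get?]; exact hc
    obtain ⟨v, hv⟩ := Option.isSome_iff_exists.mp hs
    rw [PySem.Dict.getD_of_get?_eq_some dp [] hv]
    exact h k v hv
  · rw [if_neg hc]
    constructor
    · exact PySem.Dict.getD_insert_self dp k _ []
    · intro k' v hv
      rw [PySem.Dict.get?_insert] at hv
      split at hv
      · next heq => subst heq; exact (Option.some_inj.mp hv).symm
      · exact h k' v hv

-- ---- main loop ----

theorem loop_eq (dice : List (List Int)) :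
    ∀ (combos : List (List Int)) (answer : List Int)
      (dp : PySem.Dict (List Int) (List Int)) (maxWin : Int),
      InvDp dice dp →
      (combos.foldl (stepA dice) (answer, dp, maxWin)).1 =
        (combos.foldl (stepB dice) (maxWin, answer)).2 := by
  intro combos
  induction combos with
  | nil => intro answer dp maxWin _; rfl
  | cons comb rest ih =>
    intro answer dp maxWin hinv
    rw [List.foldl_cons, List.foldl_cons]
    simp only [stepA, stepB]
    set dp1 := (if dp.contains comb then dp
        else dp.insert comb (PySem.List.sorted (getDiceSum comb 0 dice []) (fun x => x)))
      with hdp1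
    set bSide := PySem.Set.diff
        (PySem.Set.ofList (PySem.List.pyRange 1 ((dice.length : Int) + 1)))
        (PySem.Set.ofList comb) with hbs
    set dp2 := (if dp1.contains bSide then dp1
        else dp1.insert bSide (PySem.List.sorted (getDiceSum bSide 0 dice []) (fun x => x)))
      with hdp2
    have hA := cache_step dice dp comb hinv
    rw [← hdp1] at hA
    have hB := cache_step dice dp1 bSide hA.2
    rw [← hdp2] at hB
    have hwins : getWin (DistOf dice comb) (DistOf dice bSide) =
        winsTP (distAlt dice comb)
          (distAlt dice ((PySem.List.pyRange 1 ((dice.length : Int) + 1)).filter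
            (fun i => !(PySem.Set.contains (PySem.Set.ofList comb) i)))) := by
      rw [← bSide_eq_rest comb ((dice.length : Int) + 1), ← hbs, ← dist_eq, ← dist_eq]
      exact getWin_eq_winsTP _ _ (DistOf_pairwise dice comb) (DistOf_pairwise dice bSide)
    rw [hA.1, hB.1, ← hwins]
    by_cases hlt : maxWin < getWin (DistOf dice comb) (DistOf dice bSide)
    · rw [if_pos hlt, if_pos hlt]
      exact ih comb dp2 _ hB.2
    · rw [if_neg hlt, if_neg hlt]
      exact ih answer dp2 maxWin hB.2

-- ===== VERDICT (by name: the statement is the Claim_ definition above) =====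
theorem solution_spec : Claim_equal_solution := by
  intro dice _
  unfold Spec_solution solution solution_alt
  exact loop_eq dice _ [] PySem.Dict.empty 0 (fun k v hv => by
    rw [PySem.Dict.get?_empty] at hv; cases hv)
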